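-- pv_equiv track=rewrite | github.com/Tianzhengshuyuan/DRAW-demo | myutil.py | find_range_bound
-- ===== SOURCE A (Python) =====
-- def find_range_bound(xs):
--     ranges, bounds = [], []
--
--     xs = [None] + list(xs) + [None]  # add sentinels
--     last_idx = -1
--
--     for (idx, (x, xp)) in enumerate(zip(xs, xs[1:])):
--         if x != xp:
--             bounds.append(idx)
--             if last_idx != -1:
--                 ranges.append(((last_idx, idx), x))
--             last_idx = idx
--
--     return ranges, bounds
-- ===== SOURCE B (Python) =====
-- def find_range_bound(xs):
--     # Run-length decomposition: one pass extracting runs, then emit bounds/ranges.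
--     xs = list(xs)
--     n = len(xs)
--     runs = []
--     i = 0
--     while i < n:
--         j = i + 1
--         while j < n and xs[j] == xs[i]:
--             j += 1
--         runs.append((j - i, xs[i]))
--         i = j
--
--     ranges, bounds = [], []
--     if runs:
--         bounds.append(0)
--     pos = 0
--     for length, v in runs:
--         ranges.append(((pos, pos + length), v))
--         pos += length
--         bounds.append(pos)
--     return ranges, bounds
-- ===== Notes on version B (the rewrite author's own statement) =====
-- stated objective: alternative
-- what changed: A scans adjacent pairs of a None-padded copy of xs tracking the last boundary index; B first extracts the run-length encoding of xs and then emits ranges and bounds directly from cumulative run lengths, with no sentinels or pairwise comparison.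
import Mathlib
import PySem

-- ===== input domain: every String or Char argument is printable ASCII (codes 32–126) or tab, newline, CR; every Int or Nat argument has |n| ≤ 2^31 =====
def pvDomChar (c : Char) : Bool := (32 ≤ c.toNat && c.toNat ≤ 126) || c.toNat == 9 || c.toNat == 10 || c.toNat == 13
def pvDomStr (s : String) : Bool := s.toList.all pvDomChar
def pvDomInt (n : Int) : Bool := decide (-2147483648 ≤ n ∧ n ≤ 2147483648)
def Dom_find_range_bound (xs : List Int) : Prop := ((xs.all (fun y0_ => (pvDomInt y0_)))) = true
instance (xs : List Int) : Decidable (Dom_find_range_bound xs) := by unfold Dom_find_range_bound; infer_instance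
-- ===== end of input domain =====

-- B replaces A's single sentinel-padded adjacent-pair scan by a run-length decomposition
-- (extract runs, then emit bounds/ranges from run lengths); objective: alternative decomposition.

-- ===== PORT A =====
-- loop body of A's 'for (idx, (x, xp)) in enumerate(zip(xs, xs[1:]))'
-- (state: ((ranges, bounds), last_idx)).  In the branch that appends to ranges,
-- last_idx ≠ -1 guarantees idx ≥ 1, so x is never the None sentinel; '.getD 0' only
-- converts the Option, the default is never used.
def pvStepA (st : (List ((Int × Int) × Int) × List Int) × Int)
    (p : Int × (Option Int × Option Int)) : (List ((Int × Int) × Int) × List Int) × Int :=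
  let ((ranges, bounds), last_idx) := st
  let (idx, (x, xp)) := p
  if x ≠ xp then
    let bounds := bounds ++ [idx]
    let ranges := if last_idx ≠ -1 then ranges ++ [((last_idx, idx), x.getD 0)] else ranges
    ((ranges, bounds), idx)
  else st

def find_range_bound (xs : List Int) : (List ((Int × Int) × Int)) × List Int :=
  let xs' : List (Option Int) := [none] ++ xs.map some ++ [none]   -- add sentinels
  let st := (PySem.List.enumerate (xs'.zip (PySem.List.slice xs' (some 1) none)) 0).foldl
    pvStepA (([], []), -1)
  (st.1.1, st.1.2)

-- ===== PORT B =====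
-- inner while of Source B: 'j = i + 1; while j < n and xs[j] == xs[i]: j += 1'
-- (v = xs[i]); returns the final j
def pvScan (xs : List Int) (v : Int) (j : Nat) : Nat :=
  if h : j < xs.length then
    if xs[j] = v then pvScan xs v (j + 1) else j
  else j
termination_by xs.length - j

lemma pvScan_ge (xs : List Int) (v : Int) (j : Nat) : j ≤ pvScan xs v j := by
  unfold pvScan
  split
  · split
    · have := pvScan_ge xs v (j + 1)
      omega
    · exact le_refl j
  · exact le_refl j
termination_by xs.length - j

-- outer while of Source B building 'runs' (i = current position)
def pvRunsIdx (xs : List Int) (i : Nat) : List (Nat × Int) :=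
  if h : i < xs.length then
    let j := pvScan xs (xs[i]) (i + 1)
    (j - i, xs[i]) :: pvRunsIdx xs j
  else []
termination_by xs.length - i
decreasing_by
  have : i + 1 ≤ pvScan xs (xs[i]) (i + 1) := pvScan_ge xs (xs[i]) (i + 1)
  omega

-- loop body of Source B's 'for length, v in runs' (state: (pos, ranges, bounds))
def pvStepB (st : Int × List ((Int × Int) × Int) × List Int) (r : Nat × Int) :
    Int × List ((Int × Int) × Int) × List Int :=
  let (pos, ranges, bounds) := st
  let len : Int := (r.1 : Int)
  (pos + len, ranges ++ [((pos, pos + len), r.2)], bounds ++ [pos + len])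

def find_range_bound_alt (xs : List Int) : (List ((Int × Int) × Int)) × List Int :=
  let runs := pvRunsIdx xs 0
  let bounds : List Int := if runs.isEmpty then [] else [0]
  let st := runs.foldl pvStepB (0, [], bounds)
  (st.2.1, st.2.2)

-- ===== PRECONDITION & SPEC =====
def Spec_find_range_bound (xs : List Int) (out : (List ((Int × Int) × Int)) × List Int) : Prop := out = find_range_bound_alt xs
instance (xs : List Int) (out : (List ((Int × Int) × Int)) × List Int) : Decidable (Spec_find_range_bound xs out) := by unfold Spec_find_range_bound; infer_instance

-- ===== CLAIM (what is proved, stated in full; the proofs are below) =====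
def Claim_equal_find_range_bound : Prop := ∀ (xs : List Int), Dom_find_range_bound xs → Spec_find_range_bound xs (find_range_bound xs)

-- ===== LEMMAS AND PROOFS =====

-- proof-side helpers: runs as a structural recursion over suffixes
def pvRunLen (v : Int) : List Int → Nat
  | [] => 0
  | x :: r => if x = v then pvRunLen v r + 1 else 0

def pvRuns : List Int → List (Nat × Int)
  | [] => []
  | v :: r =>
    let k := 1 + pvRunLen v r
    (k, v) :: pvRuns ((v :: r).drop k)
termination_by l => l.length
decreasing_by
  simp only [List.length_drop, List.length_cons]
  omega

lemma pvScan_eq (xs : List Int) (v : Int) : ∀ j : Nat,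
    pvScan xs v j = j + pvRunLen v (xs.drop j) := by
  intro j
  unfold pvScan
  split
  · rename_i h
    rw [List.drop_eq_getElem_cons h]
    split
    · rename_i he
      rw [pvScan_eq xs v (j + 1)]
      simp [pvRunLen, he]
      omega
    · rename_i he
      simp [pvRunLen, he]
  · rename_i h
    rw [List.drop_eq_nil_of_le (by omega)]
    simp [pvRunLen]
termination_by j => xs.length - j
decreasing_by omega

lemma pvRunsIdx_eq (xs : List Int) : ∀ i : Nat, pvRunsIdx xs i = pvRuns (xs.drop i) := by
  intro i
  unfold pvRunsIdx
  split
  · rename_i h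
    rw [List.drop_eq_getElem_cons h, pvRuns]
    have hs := pvScan_eq xs (xs[i]) (i + 1)
    have hge : i + 1 ≤ pvScan xs (xs[i]) (i + 1) := pvScan_ge xs (xs[i]) (i + 1)
    dsimp only
    rw [pvRunsIdx_eq xs (pvScan xs (xs[i]) (i + 1)), hs,
      show (1 + pvRunLen (xs[i]) (List.drop (i + 1) xs))
          = pvRunLen (xs[i]) (List.drop (i + 1) xs) + 1 from by omega,
      List.drop_succ_cons, List.drop_drop]
    simp only [List.cons.injEq, Prod.mk.injEq]
    refine ⟨⟨by omega, trivial⟩, trivial⟩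
  · rename_i h
    rw [List.drop_eq_nil_of_le (by omega), pvRuns]
termination_by i => xs.length - i
decreasing_by
  have : i + 1 ≤ pvScan xs (xs[i]) (i + 1) := pvScan_ge xs (xs[i]) (i + 1)
  omega

-- A's loop, after the first (sentinel) pair, as a structural recursion:
-- prev = previous element, i = index of the next pair, last = start of the current run.
def pvGoA (prev : Int) (i last : Int) (ranges : List ((Int × Int) × Int)) (bounds : List Int) :
    List Int → (List ((Int × Int) × Int)) × List Int
  | [] => (ranges ++ [((last, i), prev)], bounds ++ [i])
  | y :: rest =>
    if prev = y then pvGoA y (i + 1) last ranges bounds rest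
    else pvGoA y (i + 1) i (ranges ++ [((last, i), prev)]) (bounds ++ [i]) rest

-- B's second loop, result part only
def pvB2 (ranges : List ((Int × Int) × Int)) (bounds : List Int) (pos : Int)
    (runs : List (Nat × Int)) : (List ((Int × Int) × Int)) × List Int :=
  let st := runs.foldl pvStepB (pos, ranges, bounds)
  (st.2.1, st.2.2)

-- add c to the length of the first run
def pvBump (c : Nat) : List (Nat × Int) → List (Nat × Int)
  | [] => []
  | (n, v) :: t => (n + c, v) :: t

lemma pvBridge (rem : List Int) : ∀ (prev : Int) (i last : Int)
    (ranges : List ((Int × Int) × Int)) (bounds : List Int),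
    last ≠ -1 → 0 ≤ i →
    (List.foldl pvStepA ((ranges, bounds), last)
      (PySem.List.enumerate ((some prev :: (rem.map some ++ [none])).zip (rem.map some ++ [none])) i)).1
    = pvGoA prev i last ranges bounds rem := by
  induction rem with
  | nil =>
    intro prev i last ranges bounds hlast hi
    simp [PySem.List.enumerate_cons, pvStepA, pvGoA, hlast]
  | cons y rest ih =>
    intro prev i last ranges bounds hlast hi
    simp only [List.map_cons, List.cons_append, List.zip_cons_cons,
      PySem.List.enumerate_cons, List.foldl_cons]
    by_cases h : prev = y
    · subst h
      simp only [pvStepA, ne_eq, not_true_eq_false, Option.some.injEq, if_neg,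
        not_not, if_pos rfl]
      simpa [pvGoA] using ih prev (i + 1) last ranges bounds hlast (by omega)
    · have hne : (some prev : Option Int) ≠ some y := by simpa using h
      have hstep : pvStepA ((ranges, bounds), last) (i, (some prev, some y))
          = ((ranges ++ [((last, i), prev)], bounds ++ [i]), i) := by
        simp [pvStepA, hne, hlast]
      rw [hstep, pvGoA, if_neg h]
      exact ih y (i + 1) i _ _ (by omega) (by omega)

lemma pvRuns_cons (v : Int) (r : List Int) :
    pvRuns (v :: r) = (1 + pvRunLen v r, v) :: pvRuns (r.drop (pvRunLen v r)) := by
  rw [pvRuns]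
  have h : (1 + pvRunLen v r) = pvRunLen v r + 1 := Nat.add_comm _ _
  simp only [h, List.drop_succ_cons]

lemma pvBump_zero (l : List (Nat × Int)) : pvBump 0 l = l := by
  cases l with
  | nil => rfl
  | cons p t => cases p; simp [pvBump]

lemma pvMain (rem : List Int) : ∀ (prev : Int) (last : Int) (c : Nat)
    (ranges : List ((Int × Int) × Int)) (bounds : List Int),
    pvGoA prev (last + 1 + (c : Int)) last ranges bounds rem
    = pvB2 ranges bounds last (pvBump c (pvRuns (prev :: rem))) := by
  induction rem with
  | nil =>
    intro prev last c ranges bounds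
    simp only [pvGoA, pvRuns_cons, pvRunLen, List.drop_nil, pvRuns, pvBump, pvB2,
      List.foldl_cons, List.foldl_nil, pvStepB, Prod.mk.injEq]
    have e : last + 1 + (c : Int) = last + ((1 + 0 + c : Nat) : Int) := by push_cast; ring
    rw [e]
    simp
  | cons y rest ih =>
    intro prev last c ranges bounds
    by_cases h : prev = y
    · subst h
      rw [pvGoA, if_pos rfl]
      have h1 : last + 1 + (c : Int) + 1 = last + 1 + ((c + 1 : Nat) : Int) := by push_cast; ring
      rw [h1, ih prev last (c + 1) ranges bounds]
      congr 1
      rw [pvRuns_cons, pvRuns_cons]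
      simp [pvRunLen, pvBump]
      omega
    · rw [pvGoA, if_neg h]
      have h1 : last + 1 + (c : Int) + 1 = (last + 1 + (c : Int)) + 1 + ((0 : Nat) : Int) := by
        push_cast; ring
      rw [h1, ih y (last + 1 + (c : Int)) 0 _ _, pvBump_zero]
      rw [pvRuns_cons prev (y :: rest)]
      simp only [pvRunLen, if_neg (show ¬ (y = prev) from fun hyx => h hyx.symm), List.drop_zero,
        pvBump, pvB2, List.foldl_cons, pvStepB]
      have h2 : last + ((1 + c : Nat) : Int) = last + 1 + (c : Int) := by push_cast; ring
      rw [h2]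

theorem pv_equal (xs : List Int) : find_range_bound xs = find_range_bound_alt xs := by
  cases xs with
  | nil =>
    simp [find_range_bound, find_range_bound_alt, pvRunsIdx, PySem.List.slice_from_one,
      PySem.List.enumerate, pvStepA]
  | cons x rest =>
    have hA : find_range_bound (x :: rest) = pvGoA x 1 0 [] [0] rest := by
      simp only [find_range_bound]
      rw [show ([none] ++ (x :: rest).map some ++ [none] : List (Option Int))
            = none :: (some x :: (rest.map some ++ [none])) from by simp]
      rw [PySem.List.slice_from_one]
      simp only [List.tail_cons, List.zip_cons_cons, PySem.List.enumerate_cons, List.foldl_cons]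
      have hstep : pvStepA (([], []), -1) (0, (none, some x)) = (([], [(0 : Int)]), 0) := by
        simp [pvStepA]
      rw [hstep]
      norm_num
      exact pvBridge rest x 1 0 [] [0] (by omega) (by omega)
    have hB : find_range_bound_alt (x :: rest) = pvB2 [] [0] 0 (pvRuns (x :: rest)) := by
      have hne : (pvRuns (x :: rest)).isEmpty = false := by
        rw [pvRuns_cons]; rfl
      simp [find_range_bound_alt, pvB2, pvRunsIdx_eq (x :: rest) 0, hne]
    rw [hA, hB, show (1 : Int) = 0 + 1 + ((0 : Nat) : Int) from by norm_num,
      pvMain rest x 0 0 [] [0], pvBump_zero]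

-- ===== VERDICT (by name: the statement is the Claim_ definition above) =====
theorem find_range_bound_spec : Claim_equal_find_range_bound := by
  intro xs _
  unfold Spec_find_range_bound
  exact pv_equal xs
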